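-- pv_equiv track=rewrite | github.com/ruyuanzhang/RZutilpy | index.py | updatedict2dict
-- ===== SOURCE A (Python) =====
-- def updatedict2dict(x, y, mode=0):
--     '''
--     updatedict(x, y):
--
--     update dict x using the value from y. First check any y element also exist in x. If yes, update the value of the key in x using the value in y. If x or y are an object, we update the attribute value
--
--     <x>,<y> are dict
--     <mode>: is
--         (1) 0 means do not create new keys in x, if x does not have a element in y.
--         (2) 1 means create a new keys and give the element value in y to x
--         default 0
--     '''
--     assert isinstance(x, dict), 'Input should be a dict or a class'
--     assert isinstance(y, dict), 'Input should be a dict or a class'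
--
--     for ele in y.keys():
--         if ele in x.keys():
--             x[ele] = y[ele]
--         else:
--             if mode == 0:
--                 continue
--             elif mode == 1:
--                 x[ele] = y[ele]
--     return x
-- ===== SOURCE B (Python) =====
-- def updatedict2dict(x, y, mode=0):
--     assert isinstance(x, dict), 'Input should be a dict or a class'
--     assert isinstance(y, dict), 'Input should be a dict or a class'
--     merged = {k: y.get(k, v) for k, v in x.items()}
--     if mode == 1:
--         merged.update((k, v) for k, v in y.items() if k not in merged)
--     x.clear()
--     x.update(merged)
--     return x
-- ===== Notes on version B (the rewrite author's own statement) =====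
-- stated objective: alternative
-- what changed: B builds the result directly instead of mutating-in-a-loop: a dict comprehension maps every existing entry of x to y's value when y has the key (keeping x's value otherwise), and for mode==1 appends y's genuinely new items in one filtered pass; A instead iterates over y's keys with a per-key membership test and mode branching.
import Mathlib
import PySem

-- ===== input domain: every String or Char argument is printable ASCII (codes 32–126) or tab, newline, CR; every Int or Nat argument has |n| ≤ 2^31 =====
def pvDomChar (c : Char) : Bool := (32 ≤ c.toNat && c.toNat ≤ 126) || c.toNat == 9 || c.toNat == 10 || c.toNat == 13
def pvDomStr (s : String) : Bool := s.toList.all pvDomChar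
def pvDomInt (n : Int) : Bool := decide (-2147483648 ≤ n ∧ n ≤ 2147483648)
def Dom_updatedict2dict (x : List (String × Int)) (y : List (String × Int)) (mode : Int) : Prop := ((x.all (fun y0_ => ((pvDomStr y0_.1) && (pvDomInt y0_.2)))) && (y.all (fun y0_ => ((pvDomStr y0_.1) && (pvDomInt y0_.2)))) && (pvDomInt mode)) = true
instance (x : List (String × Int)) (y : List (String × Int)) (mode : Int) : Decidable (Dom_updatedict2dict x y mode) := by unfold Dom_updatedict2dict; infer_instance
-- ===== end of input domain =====

-- B builds the merged dict directly (comprehension over x's entries taking y's value when present,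
-- plus, for mode==1, y's new items appended in one filtered pass) instead of A's key-by-key
-- mutation loop with a membership test; objective: alternative. Both Pythons leave x holding the
-- result (A updates it in place, B clears and refills it); equivalence here is about the return value.

-- ===== PORT A =====
def updatedict2dict (x : List (String × Int)) (y : List (String × Int)) (mode : Int) : List (String × Int) :=
  let xd : PySem.Dict String Int := PySem.Dict.ofList x
  let yd : PySem.Dict String Int := PySem.Dict.ofList y
  (yd.keys.foldl (fun d ele =>
      if d.contains ele then d.insert ele (yd.getD ele 0)
      else if mode = 0 then d
      else if mode = 1 then d.insert ele (yd.getD ele 0)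
      else d) xd).items

-- ===== PORT B =====
def updatedict2dict_alt (x : List (String × Int)) (y : List (String × Int)) (mode : Int) : List (String × Int) :=
  let xd : PySem.Dict String Int := PySem.Dict.ofList x
  let yd : PySem.Dict String Int := PySem.Dict.ofList y
  -- merged = {k: y.get(k, v) for k, v in x.items()}
  let merged : List (String × Int) := xd.items.map (fun p => (p.1, yd.getD p.1 p.2))
  -- if mode == 1: merged.update((k, v) for k, v in y.items() if k not in merged)
  if mode = 1 then merged ++ yd.items.filter (fun p => !(merged.any (fun q => q.1 == p.1)))
  else merged

-- ===== PRECONDITION & SPEC =====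
def Spec_updatedict2dict (x : List (String × Int)) (y : List (String × Int)) (mode : Int) (out : List (String × Int)) : Prop := out = updatedict2dict_alt x y mode
instance (x : List (String × Int)) (y : List (String × Int)) (mode : Int) (out : List (String × Int)) : Decidable (Spec_updatedict2dict x y mode out) := by unfold Spec_updatedict2dict; infer_instance

-- ===== CLAIM =====
def Claim_equal_updatedict2dict : Prop := ∀ (x : List (String × Int)) (y : List (String × Int)) (mode : Int), Dom_updatedict2dict x y mode → Spec_updatedict2dict x y mode (updatedict2dict x y mode)

-- ===== LEMMAS AND PROOFS =====

-- A's update-only loop (mode ≠ 1): each overwrite of an already-present key rewrites that item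
-- in place, so the items end up mapped pointwise.
lemma foldA_items (yd : PySem.Dict String Int) (l : List String) (d : PySem.Dict String Int)
    (hnd : d.keys.Nodup) :
    (l.foldl (fun d k => if d.contains k then d.insert k (yd.getD k 0) else d) d).items
      = d.items.map (fun p => if p.1 ∈ l then (p.1, yd.getD p.1 0) else p) := by
  induction l generalizing d with
  | nil => simp
  | cons k l ih =>
    simp only [List.foldl_cons]
    by_cases h : d.contains k = true
    · rw [if_pos h, ih _ (PySem.Dict.nodup_keys_insert d k _ hnd),
        PySem.Dict.items_insert_of_contains d _ h, List.map_map]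
      refine List.map_congr_left (fun p hp => ?_)
      by_cases hk : p.1 = k
      · simp [hk]
      · simp [Function.comp, hk, beq_iff_eq]
    · rw [if_neg h, ih _ hnd]
      refine List.map_congr_left (fun p hp => ?_)
      have hk : p.1 ≠ k := by
        intro hkk
        exact h ((PySem.Dict.contains_iff_mem_keys d k).mpr
          (hkk ▸ PySem.Dict.mem_keys_of_mem_items d hp))
      simp [hk]

-- A's mode-1 loop over a duplicate-free key list: existing keys are overwritten in place,
-- fresh keys are appended in order.
lemma foldA1_items (yd : PySem.Dict String Int) (l : List String) (d : PySem.Dict String Int)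
    (hnd : d.keys.Nodup) (hl : l.Nodup) :
    (l.foldl (fun d k => d.insert k (yd.getD k 0)) d).items
      = d.items.map (fun p => if p.1 ∈ l then (p.1, yd.getD p.1 0) else p)
        ++ (l.filter (fun k => !(d.contains k))).map (fun k => (k, yd.getD k 0)) := by
  induction l generalizing d with
  | nil => simp
  | cons k l ih =>
    have hkl : k ∉ l := (List.nodup_cons.mp hl).1
    have hl' : l.Nodup := (List.nodup_cons.mp hl).2
    simp only [List.foldl_cons]
    rw [ih _ (PySem.Dict.nodup_keys_insert d k _ hnd) hl']
    by_cases h : d.contains k = true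
    · rw [PySem.Dict.items_insert_of_contains d _ h, List.map_map]
      have hfil : (l.filter (fun k' => !((d.insert k (yd.getD k 0)).contains k')))
          = l.filter (fun k' => !(d.contains k')) := by
        refine List.filter_congr (fun k' hk' => ?_)
        have : k' ≠ k := fun hkk => hkl (hkk ▸ hk')
        simp [PySem.Dict.contains_insert, this]
      rw [hfil, List.filter_cons, if_neg (by simp [h])]
      refine congrArg (· ++ _) (List.map_congr_left (fun p hp => ?_))
      by_cases hk : p.1 = k
      · simp [Function.comp, hk, hkl]
      · simp [Function.comp, hk, beq_iff_eq]
    · rw [PySem.Dict.items_insert_of_not_contains d _ (by simpa using h), List.map_append]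
      have hfil : (l.filter (fun k' => !((d.insert k (yd.getD k 0)).contains k')))
          = l.filter (fun k' => !(d.contains k')) := by
        refine List.filter_congr (fun k' hk' => ?_)
        have : k' ≠ k := fun hkk => hkl (hkk ▸ hk')
        simp [PySem.Dict.contains_insert, this]
      rw [hfil, List.filter_cons, if_pos (by simp [h]), List.map_cons, List.append_assoc]
      refine congrArg₂ (· ++ ·) (List.map_congr_left (fun p hp => ?_)) ?_
      · have hk : p.1 ≠ k := by
          intro hkk
          exact absurd ((PySem.Dict.contains_iff_mem_keys d k).mpr
            (hkk ▸ PySem.Dict.mem_keys_of_mem_items d hp)) (by simp [h])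
        simp [hk]
      · simp [hkl]

-- The overwrite map over x's items is B's comprehension: when y has the key the default never
-- matters, otherwise getD returns x's value back.
lemma map_overwrite_eq (xd yd : PySem.Dict String Int) :
    xd.items.map (fun p => if p.1 ∈ yd.keys then (p.1, yd.getD p.1 0) else p)
      = xd.items.map (fun p => (p.1, yd.getD p.1 p.2)) := by
  refine List.map_congr_left (fun p hp => ?_)
  by_cases h : p.1 ∈ yd.keys
  · cases hw : yd.get? p.1 with
    | none => exact absurd h ((PySem.Dict.get?_eq_none_iff_not_mem_keys yd p.1).mp hw)
    | some w => simp [h, PySem.Dict.getD_eq_get?_getD, hw]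
  · have hc : yd.contains p.1 = false := by
      simp [PySem.Dict.contains_eq_decide_mem_keys, h]
    simp [h, PySem.Dict.getD_of_not_contains, hc]

-- ===== VERDICT =====
theorem updatedict2dict_spec : Claim_equal_updatedict2dict := by
  intro x y mode _
  unfold Spec_updatedict2dict updatedict2dict updatedict2dict_alt
  simp only []
  set xd : PySem.Dict String Int := PySem.Dict.ofList x with hxd
  set yd : PySem.Dict String Int := PySem.Dict.ofList y with hyd
  have hndx : xd.keys.Nodup := PySem.Dict.nodup_keys_ofList x
  have hndy : yd.keys.Nodup := PySem.Dict.nodup_keys_ofList y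
  by_cases hm : mode = 1
  · subst hm
    rw [if_pos rfl]
    have hbody : (fun (d : PySem.Dict String Int) (ele : String) =>
        if d.contains ele then d.insert ele (yd.getD ele 0)
        else if (1 : Int) = 0 then d
        else if (1 : Int) = 1 then d.insert ele (yd.getD ele 0)
        else d) = fun d k => d.insert k (yd.getD k 0) := by
      funext d k; split <;> simp
    rw [hbody, foldA1_items yd yd.keys xd hndx hndy, map_overwrite_eq]
    refine congrArg (HAppend.hAppend (xd.items.map (fun p => (p.1, yd.getD p.1 p.2)))) ?_
    rw [PySem.Dict.items_eq_map_keys yd hndy 0, List.filter_map]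
    refine congrArg (List.map _) (List.filter_congr (fun k hk => ?_))
    have : ((xd.items.map (fun p => (p.1, yd.getD p.1 p.2))).any (fun q => q.1 == k))
        = xd.contains k := by
      rw [List.any_map, PySem.Dict.contains_eq_decide_mem_keys, Bool.eq_iff_iff]
      simp only [Function.comp_def, PySem.Dict.keys, List.any_eq_true, List.mem_map,
        beq_iff_eq, decide_eq_true_eq]
    simp [Function.comp, this]
  · rw [if_neg hm]
    have hbody : (fun (d : PySem.Dict String Int) (ele : String) =>
        if d.contains ele then d.insert ele (yd.getD ele 0)
        else if mode = 0 then d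
        else if mode = 1 then d.insert ele (yd.getD ele 0)
        else d) = fun d k => if d.contains k then d.insert k (yd.getD k 0) else d := by
      funext d k; split
      · rfl
      · split
        · rfl
        · rfl
    rw [hbody, foldA_items yd yd.keys xd hndx, map_overwrite_eq]
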